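-- pv_equiv track=rewrite | github.com/transientlunatic/Rugby-Data | rugby/scrapers/six_nations.py | _parse_rugbybox_params
-- ===== SOURCE A (Python) =====
-- from typing import Dict, List, Optional, Any, Tuple
--
-- def _parse_rugbybox_params(rugbybox_text: str) -> Dict[str, str]:
--     """
--     Parse top-level parameters from a rugbybox template.
--
--     Properly handles multi-line parameter values by tracking parameter boundaries.
--     """
--     params = {}
--
--     # Remove the opening {{ and closing }}
--     content = rugbybox_text[2:-2].strip()
--
--     # Split by lines and parse line by line
--     lines = content.split('\n')
--     current_key = None
--     current_value = []
--
--     for line in lines: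
--         # Check if this line starts a new parameter (starts with |)
--         if line.strip().startswith('|') and '=' in line:
--             # Save previous parameter if any
--             if current_key:
--                 params[current_key] = '\n'.join(current_value)
--
--             # Parse new parameter
--             line = line.strip()[1:]  # Remove leading |
--             key, value = line.split('=', 1)
--             current_key = key.strip()
--             current_value = [value.strip()]
--         elif current_key:
--             # Continuation of previous parameter value
--             current_value.append(line)
--
--     # Don't forget the last parameter
--     if current_key:
--         params[current_key] = '\n'.join(current_value)
--
--     return params
-- ===== SOURCE B (Python) =====
-- def _parse_rugbybox_params(rugbybox_text: str):
--     """
--     Parse top-level parameters from a rugbybox template.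
--
--     Two-phase decomposition: group the lines into (key, joined-value) pairs by
--     scanning from each parameter-start line to the next, then build the dict
--     from the pair list at the end.
--     """
--     content = rugbybox_text[2:-2].strip()
--     lines = content.split('\n')
--
--     def is_start(line):
--         return line.strip().startswith('|') and '=' in line
--
--     pairs = []
--     i = 0
--     n = len(lines)
--     while i < n:
--         line = lines[i]
--         i += 1
--         if not is_start(line):
--             continue  # lines before the first parameter are ignored
--         key, value = line.strip()[1:].split('=', 1)
--         parts = [value.strip()]
--         while i < n and not is_start(lines[i]):
--             parts.append(lines[i])
--             i += 1
--         key = key.strip()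
--         if key:  # an empty key is silently dropped
--             pairs.append((key, '\n'.join(parts)))
--     return dict(pairs)
-- ===== Notes on version B (the rewrite author's own statement) =====
-- stated objective: alternative
-- what changed: Replaces A's single fold carrying (params, current_key, current_value) mutable state with a two-phase decomposition: group the lines into (key, joined-value) pairs by scanning from each parameter-start line to the next, then build the dict from the pair list.
import Mathlib
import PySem

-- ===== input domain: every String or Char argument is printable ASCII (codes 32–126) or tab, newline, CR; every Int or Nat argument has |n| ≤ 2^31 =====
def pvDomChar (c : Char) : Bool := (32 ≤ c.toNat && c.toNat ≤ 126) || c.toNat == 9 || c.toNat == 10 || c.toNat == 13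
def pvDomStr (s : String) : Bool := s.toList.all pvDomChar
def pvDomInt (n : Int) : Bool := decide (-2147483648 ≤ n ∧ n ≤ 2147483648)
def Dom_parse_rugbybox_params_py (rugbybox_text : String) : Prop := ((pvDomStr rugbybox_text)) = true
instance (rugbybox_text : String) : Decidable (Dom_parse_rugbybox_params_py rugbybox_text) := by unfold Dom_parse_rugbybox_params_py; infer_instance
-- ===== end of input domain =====

-- B replaces A's carried (current_key, current_value) accumulator state by a two-phase
-- decomposition (group lines into (key, value) pairs from each start line to the next, then
-- build the dict from the pair list); objective: alternative, same cost.

-- ===== PORT A =====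
-- 'line.strip().startswith("|") and "=" in line'
def pyAIsStart (line : String) : Bool :=
  PySem.Str.startswith (PySem.Str.strip line) "|" && PySem.Str.isIn "=" line

-- 'key, value = s.split("=", 1)'; the fallback branch is unreachable (the guard ensured '=' ∈ s)
def pyASplitEq1 (s : String) : String × String :=
  match PySem.Str.splitMax? s "=" 1 with
  | some (k :: v :: _) => (k, v)
  | _ => (s, "")

-- loop body over one line; state = (params, current_key, current_value).
-- 'current_key = None' is represented as "": only its truthiness and its value when truthy
-- are ever used, and None and "" are both falsy, so the behaviour is identical.
def pyAStep (st : PySem.Dict String String × String × List String) (line : String) :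
    PySem.Dict String String × String × List String :=
  if pyAIsStart line then
    let params := if st.2.1 ≠ "" then st.1.insert st.2.1 (PySem.Str.join "\n" st.2.2) else st.1
    let kv := pyASplitEq1 (PySem.Str.slice (PySem.Str.strip line) (some 1) none)
    (params, PySem.Str.strip kv.1, [PySem.Str.strip kv.2])
  else if st.2.1 ≠ "" then (st.1, st.2.1, st.2.2 ++ [line])
  else st

def parse_rugbybox_params_py (rugbybox_text : String) : List (String × String) :=
  let content := PySem.Str.strip (PySem.Str.slice rugbybox_text (some 2) (some (-2)))
  -- content.split('\n'); split? is none only for sep = "", so the getD is unreachable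
  let lines := (PySem.Str.split? content "\n").getD []
  let st := lines.foldl pyAStep (PySem.Dict.empty, "", [])
  (if st.2.1 ≠ "" then st.1.insert st.2.1 (PySem.Str.join "\n" st.2.2) else st.1).items

-- ===== PORT B =====
def pyBIsStart (line : String) : Bool :=
  PySem.Str.startswith (PySem.Str.strip line) "|" && PySem.Str.isIn "=" line

def pyBSplitEq1 (s : String) : String × String :=
  match PySem.Str.splitMax? s "=" 1 with
  | some (k :: v :: _) => (k, v)
  | _ => (s, "")

-- outer while loop of Source B: skip non-start lines, then from each start line take its
-- continuation lines (inner while) and emit the (key, joined value) pair unless key is empty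
def pyBGroups : List String → List (String × String)
  | [] => []
  | line :: rest =>
    if pyBIsStart line then
      let kv := pyBSplitEq1 (PySem.Str.slice (PySem.Str.strip line) (some 1) none)
      let parts := PySem.Str.strip kv.2 :: rest.takeWhile (fun l => !pyBIsStart l)
      let key := PySem.Str.strip kv.1
      (if key ≠ "" then [(key, PySem.Str.join "\n" parts)] else []) ++
        pyBGroups (rest.dropWhile (fun l => !pyBIsStart l))
    else pyBGroups rest
  termination_by ls => ls.length
  decreasing_by
    · exact Nat.lt_succ_of_le (List.length_dropWhile_le _ _)
    · simp

def parse_rugbybox_params_py_alt (rugbybox_text : String) : List (String × String) :=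
  let content := PySem.Str.strip (PySem.Str.slice rugbybox_text (some 2) (some (-2)))
  let lines := (PySem.Str.split? content "\n").getD []
  (PySem.Dict.ofList (pyBGroups lines)).items

-- ===== PRECONDITION & SPEC =====
def Spec_parse_rugbybox_params_py (rugbybox_text : String) (out : List (String × String)) : Prop := out = parse_rugbybox_params_py_alt rugbybox_text
instance (rugbybox_text : String) (out : List (String × String)) : Decidable (Spec_parse_rugbybox_params_py rugbybox_text out) := by unfold Spec_parse_rugbybox_params_py; infer_instance

-- ===== CLAIM (what is proved, stated in full; the proofs are below) =====
def Claim_equal_parse_rugbybox_params_py : Prop := ∀ (rugbybox_text : String), Dom_parse_rugbybox_params_py rugbybox_text → Spec_parse_rugbybox_params_py rugbybox_text (parse_rugbybox_params_py rugbybox_text)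

-- ===== LEMMAS AND PROOFS =====

-- A's trailing 'save the last parameter' step, on a fold state
def pvFinish (st : PySem.Dict String String × String × List String) : PySem.Dict String String :=
  if st.2.1 ≠ "" then st.1.insert st.2.1 (PySem.Str.join "\n" st.2.2) else st.1

theorem pvIsStart_eq : pyAIsStart = pyBIsStart := rfl

theorem pvSplitEq1_eq : pyASplitEq1 = pyBSplitEq1 := rfl

theorem pyBGroups_cons (line : String) (rest : List String) :
    pyBGroups (line :: rest) =
      if pyBIsStart line then
        (if PySem.Str.strip (pyBSplitEq1 (PySem.Str.slice (PySem.Str.strip line) (some 1) none)).1 ≠ "" then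
            [(PySem.Str.strip (pyBSplitEq1 (PySem.Str.slice (PySem.Str.strip line) (some 1) none)).1,
              PySem.Str.join "\n" (PySem.Str.strip (pyBSplitEq1 (PySem.Str.slice (PySem.Str.strip line) (some 1) none)).2
                :: rest.takeWhile (fun l => !pyBIsStart l)))]
          else []) ++ pyBGroups (rest.dropWhile (fun l => !pyBIsStart l))
      else pyBGroups rest := by
  rw [pyBGroups]

-- skipping leading non-start lines does not change the groups
theorem pyBGroups_dropWhile (ls : List String) :
    pyBGroups (ls.dropWhile (fun l => !pyBIsStart l)) = pyBGroups ls := by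
  induction ls with
  | nil => rfl
  | cons line rest ih =>
    by_cases h : pyBIsStart line
    · simp [h]
    · rw [List.dropWhile_cons]
      simp only [h, Bool.not_false, if_true]
      rw [ih, pyBGroups_cons]
      simp [h]

-- main invariant: folding A's step from any state and then finishing equals folding
-- dict-insert of the pending pair (if the key is truthy) and of B's groups of the rest
theorem pvLoop (ls : List String) :
    ∀ (params : PySem.Dict String String) (ck : String) (cv : List String),
    pvFinish (ls.foldl pyAStep (params, ck, cv)) =
      ((if ck ≠ "" then [(ck, PySem.Str.join "\n" (cv ++ ls.takeWhile (fun l => !pyBIsStart l)))] else [])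
        ++ pyBGroups (ls.dropWhile (fun l => !pyBIsStart l))).foldl
        (fun d p => d.insert p.1 p.2) params := by
  induction ls with
  | nil =>
    intro params ck cv
    by_cases h : ck = "" <;> simp [pvFinish, h, pyBGroups]
  | cons line rest ih =>
    intro params ck cv
    rw [List.foldl_cons]
    by_cases h : pyBIsStart line
    · have hstep : pyAStep (params, ck, cv) line =
        ((if ck ≠ "" then params.insert ck (PySem.Str.join "\n" cv) else params),
          PySem.Str.strip (pyBSplitEq1 (PySem.Str.slice (PySem.Str.strip line) (some 1) none)).1,
          [PySem.Str.strip (pyBSplitEq1 (PySem.Str.slice (PySem.Str.strip line) (some 1) none)).2]) := by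
        simp [pyAStep, pvIsStart_eq, pvSplitEq1_eq, h]
      rw [hstep, ih]
      rw [List.takeWhile_cons, List.dropWhile_cons]
      simp only [h, Bool.not_true, Bool.false_eq_true, if_false]
      rw [pyBGroups_cons]
      simp only [h, if_true]
      by_cases hk : ck = "" <;> simp [hk, List.foldl_append]
    · have hstep : pyAStep (params, ck, cv) line =
        if ck ≠ "" then (params, ck, cv ++ [line]) else (params, ck, cv) := by
        simp [pyAStep, pvIsStart_eq, h]
      rw [List.takeWhile_cons, List.dropWhile_cons]
      simp only [h, Bool.not_false, if_true]
      by_cases hk : ck = ""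
      · rw [hstep]; simp only [hk, ne_eq, not_true_eq_false, if_false]
        simp [ih]
      · rw [hstep]; simp only [ne_eq, hk, not_false_eq_true, if_true]
        rw [ih]
        simp [hk, List.append_assoc]

-- ===== VERDICT (by name: the statement is the Claim_ definition above) =====
theorem pvMain (lines : List String) :
    (pvFinish (lines.foldl pyAStep (PySem.Dict.empty, "", []))).items
      = (PySem.Dict.ofList (pyBGroups lines)).items := by
  rw [pvLoop lines PySem.Dict.empty "" []]
  simp only [ne_eq, not_true_eq_false, if_false, List.nil_append]
  rw [pyBGroups_dropWhile]
  rfl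

theorem parse_rugbybox_params_py_spec : Claim_equal_parse_rugbybox_params_py := by
  intro t _
  show parse_rugbybox_params_py t = parse_rugbybox_params_py_alt t
  simp only [parse_rugbybox_params_py, parse_rugbybox_params_py_alt]
  exact pvMain _
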